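-- pv_equiv track=rewrite | github.com/mikkohei13/havistin2 | app/havis_finbif_submit.py | _pick_taxon_id
-- ===== SOURCE A (Python) =====
-- from typing import Any, Optional
--
-- def _pick_taxon_id(results: list, vernacular_fi: str) -> Optional[str]:
--     target = vernacular_fi.strip().lower()
--     candidates = []
--     for r in results:
--         tid = r.get("id")
--         if not tid or not str(tid).startswith("MX."):
--             continue
--         candidates.append(r)
--     if not candidates:
--         return None
--     for r in candidates:
--         vn = (r.get("vernacularName") or "").strip().lower()
--         if vn == target:
--             return str(r["id"])
--     return str(candidates[0]["id"])
-- ===== SOURCE B (Python) =====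
-- from typing import Any, Optional
--
-- def _pick_taxon_id(results: list, vernacular_fi: str) -> Optional[str]:
--     target = vernacular_fi.strip().lower()
--     first_id = None
--     for r in results:
--         tid = r.get("id")
--         if not tid or not str(tid).startswith("MX."):
--             continue
--         if first_id is None:
--             first_id = str(tid)
--         vn = (r.get("vernacularName") or "").strip().lower()
--         if vn == target:
--             return str(tid)
--     return first_id
-- ===== Notes on version B (the rewrite author's own statement) =====
-- stated objective: simpler
-- what changed: Fuses A's two passes (build a candidates list, then rescan it) into one early-returning pass that keeps only the first qualifying id as fallback, never materialising the candidates list.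
import Mathlib
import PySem

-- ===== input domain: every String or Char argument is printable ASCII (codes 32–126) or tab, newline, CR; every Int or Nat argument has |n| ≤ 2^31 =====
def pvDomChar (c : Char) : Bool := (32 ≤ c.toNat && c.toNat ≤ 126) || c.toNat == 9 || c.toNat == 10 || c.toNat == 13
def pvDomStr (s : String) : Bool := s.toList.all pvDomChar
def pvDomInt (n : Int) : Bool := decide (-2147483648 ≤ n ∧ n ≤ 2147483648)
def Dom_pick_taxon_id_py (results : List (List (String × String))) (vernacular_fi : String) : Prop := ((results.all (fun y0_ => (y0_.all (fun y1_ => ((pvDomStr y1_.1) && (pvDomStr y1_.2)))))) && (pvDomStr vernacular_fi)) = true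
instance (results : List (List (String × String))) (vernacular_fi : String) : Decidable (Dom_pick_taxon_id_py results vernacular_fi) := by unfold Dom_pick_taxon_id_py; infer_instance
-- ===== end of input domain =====

-- B fuses A's two passes (build a candidates list, then rescan it) into one early-returning
-- pass keeping only the first qualifying id as fallback; objective: simpler, same O(n) cost.
-- dicts are association lists; `r.get(k)` = first match = List.lookup.

-- ===== PORT A =====
-- A's second loop: scan candidates for a vernacularName match.  Every candidate carries the
-- "id" key (A's first loop checked it), so the `.getD ""` default for r["id"] is unreachable.
def pick_taxon_id_py_loop2 (target : String) (cs : List (List (String × String))) : Option String :=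
  match cs with
  | [] => none
  | r :: rest =>
    let vn := PySem.Str.lower (PySem.Str.strip ((List.lookup "vernacularName" r).getD ""))
    if vn = target then some ((List.lookup "id" r).getD "")
    else pick_taxon_id_py_loop2 target rest

def pick_taxon_id_py (results : List (List (String × String))) (vernacular_fi : String) : Option String :=
  let target := PySem.Str.lower (PySem.Str.strip vernacular_fi)
  let candidates := results.foldl (fun acc r =>
    match List.lookup "id" r with
    | none => acc
    | some tid =>
      -- `not tid or not tid.startswith("MX.")` (tid is a string, so `not tid` ↔ tid == "")
      if (tid == "" || !PySem.Str.startswith tid "MX.") then acc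
      else acc ++ [r]) []
  match candidates with
  | [] => none
  | c0 :: _ =>
    match pick_taxon_id_py_loop2 target candidates with
    | some v => some v
    | none => some ((List.lookup "id" c0).getD "")

-- ===== PORT B =====
def pick_taxon_id_py_alt_loop (target : String) (first_id : Option String)
    (rs : List (List (String × String))) : Option String :=
  match rs with
  | [] => first_id
  | r :: rest =>
    match List.lookup "id" r with
    | none => pick_taxon_id_py_alt_loop target first_id rest
    | some tid =>
      if (tid == "" || !PySem.Str.startswith tid "MX.") then
        pick_taxon_id_py_alt_loop target first_id rest
      else
        let fid := match first_id with | none => tid | some f => f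
        let vn := PySem.Str.lower (PySem.Str.strip ((List.lookup "vernacularName" r).getD ""))
        if vn = target then some tid
        else pick_taxon_id_py_alt_loop target (some fid) rest

def pick_taxon_id_py_alt (results : List (List (String × String))) (vernacular_fi : String) : Option String :=
  pick_taxon_id_py_alt_loop (PySem.Str.lower (PySem.Str.strip vernacular_fi)) none results

-- ===== PRECONDITION & SPEC =====
def Spec_pick_taxon_id_py (results : List (List (String × String))) (vernacular_fi : String) (out : Option String) : Prop := out = pick_taxon_id_py_alt results vernacular_fi
instance (results : List (List (String × String))) (vernacular_fi : String) (out : Option String) : Decidable (Spec_pick_taxon_id_py results vernacular_fi out) := by unfold Spec_pick_taxon_id_py; infer_instance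

-- ===== CLAIM (what is proved, stated in full; the proofs are below) =====
def Claim_equal_pick_taxon_id_py : Prop := ∀ (results : List (List (String × String))) (vernacular_fi : String), Dom_pick_taxon_id_py results vernacular_fi → Spec_pick_taxon_id_py results vernacular_fi (pick_taxon_id_py results vernacular_fi)

-- ===== LEMMAS AND PROOFS =====

-- the qualifying results, as a filter (proof-side characterisation of A's first loop)
def pvCands (rs : List (List (String × String))) : List (List (String × String)) :=
  rs.filter (fun r =>
    match List.lookup "id" r with
    | none => false
    | some tid => !(tid == "" || !PySem.Str.startswith tid "MX."))

theorem pvCands_foldl (rs : List (List (String × String)))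
    (acc : List (List (String × String))) :
    rs.foldl (fun acc r =>
      match List.lookup "id" r with
      | none => acc
      | some tid =>
        if (tid == "" || !PySem.Str.startswith tid "MX.") then acc
        else acc ++ [r]) acc = acc ++ pvCands rs := by
  induction rs generalizing acc with
  | nil => simp only [List.foldl_nil, pvCands, List.filter_nil, List.append_nil]
  | cons r rest ih =>
    simp [pvCands] at ih
    simp only [List.foldl_cons, pvCands, List.filter_cons]
    rcases h : List.lookup "id" r with _ | tid
    · simp [h, ih, pvCands]
    · cases hq : (tid == "" || !PySem.Str.startswith tid "MX.") with
      | true =>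
        simp at hq
        rcases hq with hq | hq <;> simp [h, hq, ih, pvCands]
      | false =>
        simp at hq
        obtain ⟨h1, h2⟩ := hq
        simp [h, h1, h2, ih, pvCands]

theorem alt_loop_some (target f : String) (rs : List (List (String × String))) :
    pick_taxon_id_py_alt_loop target (some f) rs =
      match pick_taxon_id_py_loop2 target (pvCands rs) with
      | some v => some v
      | none => some f := by
  induction rs generalizing f with
  | nil => simp only [pick_taxon_id_py_alt_loop, pvCands, List.filter_nil, pick_taxon_id_py_loop2]
  | cons r rest ih =>
    simp [pvCands] at ih
    simp only [pick_taxon_id_py_alt_loop, pvCands, List.filter_cons]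
    rcases h : List.lookup "id" r with _ | tid
    · simp [h, ih, pvCands]
    · cases hq : (tid == "" || !PySem.Str.startswith tid "MX.") with
      | true =>
        simp at hq
        rcases hq with hq | hq <;> simp [h, hq, ih, pvCands]
      | false =>
        simp at hq
        obtain ⟨h1, h2⟩ := hq
        by_cases hv : PySem.Str.lower (PySem.Str.strip ((List.lookup "vernacularName" r).getD "")) = target
        · simp [h, h1, h2, pvCands, pick_taxon_id_py_loop2, hv]
        · simp [h, h1, h2, ih, pvCands, pick_taxon_id_py_loop2, hv]

theorem alt_loop_none (target : String) (rs : List (List (String × String))) :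
    pick_taxon_id_py_alt_loop target none rs =
      match pvCands rs with
      | [] => none
      | c0 :: _ =>
        match pick_taxon_id_py_loop2 target (pvCands rs) with
        | some v => some v
        | none => some ((List.lookup "id" c0).getD "") := by
  induction rs with
  | nil => simp only [pick_taxon_id_py_alt_loop, pvCands, List.filter_nil]
  | cons r rest ih =>
    simp [pvCands] at ih
    simp only [pick_taxon_id_py_alt_loop, pvCands, List.filter_cons]
    rcases h : List.lookup "id" r with _ | tid
    · simp [h, ih, pvCands]
    · cases hq : (tid == "" || !PySem.Str.startswith tid "MX.") with
      | true =>
        simp at hq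
        rcases hq with hq | hq <;> simp [h, hq, ih, pvCands]
      | false =>
        simp at hq
        obtain ⟨h1, h2⟩ := hq
        by_cases hv : PySem.Str.lower (PySem.Str.strip ((List.lookup "vernacularName" r).getD "")) = target
        · simp [h, h1, h2, pvCands, pick_taxon_id_py_loop2, hv]
        · simp [h, h1, h2, pvCands, pick_taxon_id_py_loop2, hv, alt_loop_some]

-- ===== VERDICT (by name: the statement is the Claim_ definition above) =====
theorem pick_taxon_id_py_spec : Claim_equal_pick_taxon_id_py := by
  intro results vernacular_fi _
  unfold Spec_pick_taxon_id_py pick_taxon_id_py pick_taxon_id_py_alt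
  rw [pvCands_foldl, List.nil_append, alt_loop_none]
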